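-- pv_equiv track=rewrite | github.com/isoldaliborio/challenge_100daysofcode | Python/28_challenge_test.py | create_paginator
-- ===== SOURCE A (Python) =====
-- from typing import Generator, List
--
-- def create_paginator(items: list, pageSize: int) -> Generator[List[int], None, None]:
--     page = []
--     count = 1
--
--     for item in items:
--         # add to page if count is less than page size
--         if count <= pageSize:
--             page.append(item)
--
--         # last item in page
--         if count == pageSize:
--             yield page
--
--             # reset page and counter, then go to next item with no counter increment
--             page = []
--             count = 1
--             continue
--
--         # increment counter if not last item
--         count += 1
-- ===== SOURCE B (Python) =====
-- def create_paginator(items, pageSize):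
--     # boundary computation + slicing instead of per-item accumulation with a counter
--     if pageSize > 0:
--         full = len(items) // pageSize
--         for i in range(0, full * pageSize, pageSize):
--             yield items[i:i + pageSize]
-- ===== Notes on version B (the rewrite author's own statement) =====
-- stated objective: idiomatic
-- what changed: Replaces the per-item counter/accumulator state machine by computing the number of complete pages up front and yielding fixed-size slices items[i:i+pageSize] at page boundaries.
import Mathlib
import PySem

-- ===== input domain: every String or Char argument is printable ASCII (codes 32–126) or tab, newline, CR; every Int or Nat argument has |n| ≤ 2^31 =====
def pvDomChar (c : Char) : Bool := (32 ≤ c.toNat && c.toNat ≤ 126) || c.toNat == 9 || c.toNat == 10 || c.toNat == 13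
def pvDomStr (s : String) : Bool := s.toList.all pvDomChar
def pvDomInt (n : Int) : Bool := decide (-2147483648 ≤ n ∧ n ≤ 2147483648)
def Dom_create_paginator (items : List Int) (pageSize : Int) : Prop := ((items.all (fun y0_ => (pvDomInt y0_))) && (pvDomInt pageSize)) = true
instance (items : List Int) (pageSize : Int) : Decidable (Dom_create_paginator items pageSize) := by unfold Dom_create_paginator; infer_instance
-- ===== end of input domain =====

-- B replaces A's per-item counter/accumulator state machine by boundary computation and slicing (idiomatic; the proved equivalence is about the yielded sequence, collected as a list).

-- ===== PORT A =====
-- loop body of A: state = (page, count, out); out collects the yielded pages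
def stepA (pageSize : Int) (st : List Int × Int × List (List Int)) (item : Int) :
    List Int × Int × List (List Int) :=
  let page := st.1
  let count := st.2.1
  let out := st.2.2
  let page := if count ≤ pageSize then page ++ [item] else page
  if count = pageSize then ([], 1, out ++ [page]) else (page, count + 1, out)

def create_paginator (items : List Int) (pageSize : Int) : List (List Int) :=
  (items.foldl (stepA pageSize) ([], 1, [])).2.2

-- ===== PORT B =====
def create_paginator_alt (items : List Int) (pageSize : Int) : List (List Int) :=
  if 0 < pageSize then
    let full := PySem.Int.floordiv (items.length : Int) pageSize
    (PySem.List.pyRange 0 (full * pageSize) pageSize).map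
      (fun i => PySem.List.slice items (some i) (some (i + pageSize)))
  else []

-- ===== PRECONDITION & SPEC =====
def Spec_create_paginator (items : List Int) (pageSize : Int) (out : List (List Int)) : Prop := out = create_paginator_alt items pageSize
instance (items : List Int) (pageSize : Int) (out : List (List Int)) : Decidable (Spec_create_paginator items pageSize out) := by unfold Spec_create_paginator; infer_instance

-- ===== CLAIM (what is proved, stated in full; the proofs are below) =====
def Claim_equal_create_paginator : Prop := ∀ (items : List Int) (pageSize : Int), Dom_create_paginator items pageSize → Spec_create_paginator items pageSize (create_paginator items pageSize)

-- ===== LEMMAS AND PROOFS =====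

-- common intermediate form: the list of complete p-sized chunks
def pvChunks (p : Nat) (xs : List Int) : List (List Int) :=
  if _h : 0 < p ∧ p ≤ xs.length then xs.take p :: pvChunks p (xs.drop p) else []
termination_by xs.length
decreasing_by simp; omega

theorem pvChunks_nil (p : Nat) (xs : List Int) (h : ¬ (0 < p ∧ p ≤ xs.length)) :
    pvChunks p xs = [] := by rw [pvChunks]; simp [h]

theorem pvChunks_cons (p : Nat) (xs : List Int) (h : 0 < p ∧ p ≤ xs.length) :
    pvChunks p xs = xs.take p :: pvChunks p (xs.drop p) := by rw [pvChunks]; simp [h]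

theorem foldA_nonpos (p : Int) (hp : p ≤ 0) :
    ∀ (xs : List Int) (page : List Int) (count : Int) (out : List (List Int)), 1 ≤ count →
      (xs.foldl (stepA p) (page, count, out)).2.2 = out := by
  intro xs
  induction xs with
  | nil => intro page count out _; rfl
  | cons x xs ih =>
    intro page count out hc
    simp only [List.foldl_cons, stepA]
    have h1 : ¬ (count ≤ p) := by omega
    have h2 : ¬ (count = p) := by omega
    simp only [h1, h2, if_false]
    exact ih _ _ _ (by omega)

theorem foldA_pos (p : Int) (hp : 0 < p) :
    ∀ (xs page : List Int) (out : List (List Int)), (page.length : Int) + 1 ≤ p →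
      (xs.foldl (stepA p) (page, (page.length : Int) + 1, out)).2.2
        = out ++ pvChunks p.toNat (page ++ xs) := by
  intro xs
  induction xs with
  | nil =>
    intro page out h
    have : ¬ (0 < p.toNat ∧ p.toNat ≤ (page ++ ([] : List Int)).length) := by
      simp; intro _; omega
    rw [pvChunks_nil _ _ this]; simp
  | cons x xs ih =>
    intro page out h
    simp only [List.foldl_cons, stepA]
    have h1 : (page.length : Int) + 1 ≤ p := h
    simp only [if_pos h1]
    by_cases h2 : (page.length : Int) + 1 = p
    · simp only [if_pos h2]
      have h0 : (1 : Int) = (([] : List Int).length : Int) + 1 := by simp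
      rw [h0, ih [] (out ++ [page ++ [x]]) (by simp; omega)]
      have hh : 0 < p.toNat ∧ p.toNat ≤ (page ++ x :: xs).length := by
        simp; omega
      rw [pvChunks_cons _ _ hh]
      have hpn : p.toNat = (page ++ [x]).length := by simp; omega
      have htake : (page ++ x :: xs).take p.toNat = page ++ [x] := by
        rw [hpn]
        have : page ++ x :: xs = (page ++ [x]) ++ xs := by simp
        rw [this, List.take_left]
      have hdrop : (page ++ x :: xs).drop p.toNat = xs := by
        rw [hpn]
        have : page ++ x :: xs = (page ++ [x]) ++ xs := by simp
        rw [this, List.drop_left]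
      rw [htake, hdrop]; simp
    · simp only [if_neg h2]
      have h3 : ((page ++ [x]).length : Int) + 1 ≤ p := by simp; omega
      have h4 : (page.length : Int) + 1 + 1 = ((page ++ [x]).length : Int) + 1 := by simp
      rw [h4, ih (page ++ [x]) out h3]
      simp

-- B-side: the slice map over range n computes the chunk list
theorem mapchunk (p : Nat) (hp : 0 < p) :
    ∀ (n : Nat) (xs : List Int), n = xs.length / p →
      (List.range n).map (fun k => (xs.drop (k * p)).take p) = pvChunks p xs := by
  intro n
  induction n with
  | zero =>
    intro xs hn
    have : ¬ (0 < p ∧ p ≤ xs.length) := by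
      intro ⟨_, h2⟩
      have := Nat.one_le_div_iff hp |>.mpr h2
      omega
    rw [pvChunks_nil _ _ this]; simp
  | succ n ih =>
    intro xs hn
    have hple : p ≤ xs.length := by
      by_contra hc
      rw [Nat.div_eq_of_lt (by omega)] at hn; omega
    rw [pvChunks_cons _ _ ⟨hp, hple⟩]
    rw [List.range_succ_eq_map, List.map_cons, List.map_map]
    congr 1
    · simp
    · have hn' : n = (xs.drop p).length / p := by
        have h1 : (xs.drop p).length = xs.length - p := by simp
        have h2 : xs.length - p + p = xs.length := by omega
        have h3 : (xs.length - p + p) / p = (xs.length - p) / p + 1 := Nat.add_div_right _ hp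
        rw [h2] at h3
        rw [h1]; omega
      rw [← ih (xs.drop p) hn']
      apply List.map_congr_left
      intro k _
      simp only [Function.comp]
      rw [List.drop_drop]
      congr 2
      rw [Nat.succ_mul, Nat.mul_comm]; omega

theorem B_eq_chunks (xs : List Int) (p : Int) (hp : 0 < p) :
    create_paginator_alt xs p = pvChunks p.toNat xs := by
  have hpt : 0 < p.toNat := by omega
  have hpn : p = (p.toNat : Int) := by omega
  unfold create_paginator_alt
  rw [if_pos hp]
  have hfull : PySem.Int.floordiv (xs.length : Int) p = ((xs.length / p.toNat : Nat) : Int) := by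
    rw [hpn, PySem.Int.floordiv_natCast]; simp
  rw [hfull]
  set m : Nat := xs.length / p.toNat with hm
  show (PySem.List.pyRange 0 ((m : Int) * p) p).map
      (fun i => PySem.List.slice xs (some i) (some (i + p))) = pvChunks p.toNat xs
  rw [PySem.List.pyRange_of_pos 0 ((m : Int) * p) hp]
  have hcount : (if (0:Int) < (m : Int) * p then (((m : Int) * p - 0 + p - 1) / p).toNat else 0) = m := by
    by_cases hm0 : m = 0
    · simp [hm0]
    · have hmp : (0:Int) < (m : Int) * p :=
        mul_pos (by exact_mod_cast Nat.pos_of_ne_zero hm0) hp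
      rw [if_pos hmp]
      have h1 : ((m : Int) * p - 0 + p - 1) = (p - 1) + (m : Int) * p := by ring
      rw [h1, Int.add_mul_ediv_right _ _ (by omega : p ≠ 0)]
      have h01 : (p - 1) / p = 0 := Int.ediv_eq_zero_of_lt (by omega) (by omega)
      rw [h01]; simp
  rw [hcount, List.map_map]
  rw [← mapchunk p.toNat hpt m xs hm]
  apply List.map_congr_left
  intro k _
  simp only [Function.comp]
  have e1 : (0:Int) + p * (k : Int) = ((k * p.toNat : Nat) : Int) := by
    rw [hpn]; push_cast; simp only [Int.toNat_natCast]; ring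
  have e2 : (0:Int) + p * (k : Int) + p = ((k * p.toNat : Nat) : Int) + ((p.toNat : Nat) : Int) := by
    rw [hpn]; push_cast; simp only [Int.toNat_natCast]; ring
  rw [e2, e1]
  exact PySem.List.slice_natCast_add xs (k * p.toNat) p.toNat

-- ===== VERDICT (by name: the statement is the Claim_ definition above) =====
theorem create_paginator_spec : Claim_equal_create_paginator := by
  intro items p _
  unfold Spec_create_paginator
  by_cases hp : 0 < p
  · rw [B_eq_chunks items p hp]
    unfold create_paginator
    have h0 : (1 : Int) = (([] : List Int).length : Int) + 1 := by simp
    rw [h0, foldA_pos p hp items [] [] (by simp; omega)]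
    simp
  · unfold create_paginator create_paginator_alt
    rw [foldA_nonpos p (by omega) items [] 1 [] (by omega), if_neg hp]
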